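-- pv_equiv track=rewrite | github.com/eliottcassidy2000/math | 04-computation/beta2_arcflip_invariance.py | flip_arc
-- ===== SOURCE A (Python) =====
-- def flip_arc(bits, i, j, n):
--     idx = 0
--     for a in range(n):
--         for b in range(a+1, n):
--             if a == i and b == j:
--                 return bits ^ (1 << idx)
--             idx += 1
--     return bits
-- ===== SOURCE B (Python) =====
-- def flip_arc(bits, i, j, n):
--     # closed-form pair index: pairs (a,b), a<b, enumerated lexicographically
--     if 0 <= i < j < n:
--         idx = i * n - i * (i + 1) // 2 + (j - i - 1)
--         return bits ^ (1 << idx)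
--     return bits
-- ===== Notes on version B (the rewrite author's own statement) =====
-- stated objective: faster
-- what changed: Replaced the double loop over all pairs (a,b) with the closed-form lexicographic pair index idx = i*n - i*(i+1)//2 + (j-i-1) guarded by 0 <= i < j < n.
import Mathlib
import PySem

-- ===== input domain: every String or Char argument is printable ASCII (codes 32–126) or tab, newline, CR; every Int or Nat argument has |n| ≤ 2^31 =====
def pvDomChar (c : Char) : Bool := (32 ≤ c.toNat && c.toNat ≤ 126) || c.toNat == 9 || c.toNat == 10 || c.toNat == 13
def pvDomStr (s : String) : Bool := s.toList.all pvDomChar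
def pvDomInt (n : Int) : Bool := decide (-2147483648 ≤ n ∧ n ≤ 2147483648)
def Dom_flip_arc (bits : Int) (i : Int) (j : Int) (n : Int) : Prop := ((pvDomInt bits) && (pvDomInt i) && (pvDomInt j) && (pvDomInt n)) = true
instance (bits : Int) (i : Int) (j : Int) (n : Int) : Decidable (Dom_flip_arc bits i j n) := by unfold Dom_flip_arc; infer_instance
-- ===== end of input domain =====

-- B replaces A's quadratic search over all pairs by the closed-form pair index (O(1)).

-- ===== PORT A =====
-- inner 'for b in range(a+1, n)': early return carried as 'some', else the advanced idx
def pvInnerA (bits : Int) (i : Int) (j : Int) (a : Int) (bs : List Int) (idx : Int) :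
    Option Int × Int :=
  match bs with
  | [] => (none, idx)
  | b :: rest =>
    if a = i ∧ b = j then (some (PySem.Int.bxor bits ((1 : Int) <<< idx.toNat)), idx)
    else pvInnerA bits i j a rest (idx + 1)

-- outer 'for a in range(n)'
def pvOuterA (bits : Int) (i : Int) (j : Int) (n : Int) (as_ : List Int) (idx : Int) : Int :=
  match as_ with
  | [] => bits
  | a :: rest =>
    match pvInnerA bits i j a (PySem.List.pyRange (a + 1) n 1) idx with
    | (some r, _) => r
    | (none, idx') => pvOuterA bits i j n rest idx'

def flip_arc (bits : Int) (i : Int) (j : Int) (n : Int) : Int :=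
  pvOuterA bits i j n (PySem.List.pyRange 0 n 1) 0

-- ===== PORT B =====
def flip_arc_alt (bits : Int) (i : Int) (j : Int) (n : Int) : Int :=
  if 0 ≤ i ∧ i < j ∧ j < n then
    PySem.Int.bxor bits
      ((1 : Int) <<< (i * n - PySem.Int.floordiv (i * (i + 1)) 2 + (j - i - 1)).toNat)
  else bits

-- ===== PRECONDITION & SPEC =====
def Spec_flip_arc (bits : Int) (i : Int) (j : Int) (n : Int) (out : Int) : Prop := out = flip_arc_alt bits i j n
instance (bits : Int) (i : Int) (j : Int) (n : Int) (out : Int) : Decidable (Spec_flip_arc bits i j n out) := by unfold Spec_flip_arc; infer_instance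

-- ===== CLAIM (what is proved, stated in full; the proofs are below) =====
def Claim_equal_flip_arc : Prop := ∀ (bits : Int) (i : Int) (j : Int) (n : Int), Dom_flip_arc bits i j n → Spec_flip_arc bits i j n (flip_arc bits i j n)

-- ===== LEMMAS AND PROOFS =====

-- the inner loop on range(lo, n): hit when a = i and lo ≤ j < n, at exponent idx + (j - lo)
theorem pvInnerA_range (bits i j a : Int) (n : Int) :
    ∀ (K : Nat) (lo idx : Int), (n - lo).toNat = K →
    pvInnerA bits i j a (PySem.List.pyRange lo n 1) idx =
      if a = i ∧ lo ≤ j ∧ j < n then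
        (some (PySem.Int.bxor bits ((1 : Int) <<< (idx + (j - lo)).toNat)), idx + (j - lo))
      else (none, idx + (n - lo).toNat) := by
  intro K
  induction K with
  | zero =>
    intro lo idx hK
    rw [PySem.List.pyRange_one_eq_nil (by omega)]
    simp only [pvInnerA]
    have : ¬ (a = i ∧ lo ≤ j ∧ j < n) := by rintro ⟨_, h1, h2⟩; omega
    rw [if_neg this]
    simp [hK]
  | succ K ih =>
    intro lo idx hK
    rw [PySem.List.pyRange_one_cons (by omega)]
    simp only [pvInnerA]
    by_cases h1 : a = i ∧ lo = j
    · rw [if_pos h1]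
      have : a = i ∧ lo ≤ j ∧ j < n := ⟨h1.1, by omega, by omega⟩
      rw [if_pos this]
      have : j - lo = 0 := by omega
      simp [this]
    · rw [if_neg h1, ih (lo + 1) (idx + 1) (by omega)]
      by_cases h2 : a = i ∧ lo + 1 ≤ j ∧ j < n
      · rw [if_pos h2, if_pos ⟨h2.1, by omega, h2.2.2⟩]
        have : idx + 1 + (j - (lo + 1)) = idx + (j - lo) := by ring
        rw [this]
      · have h3 : ¬ (a = i ∧ lo ≤ j ∧ j < n) := by
          rintro ⟨ha, hb, hc⟩
          exact (if h4 : lo = j then h1 ⟨ha, h4⟩ else h2 ⟨ha, by omega, hc⟩)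
        rw [if_neg h2, if_neg h3]
        have : ((n - (lo + 1)).toNat : Int) + 1 = ((n - lo).toNat : Int) := by omega
        simp only [Prod.mk.injEq]
        exact ⟨trivial, by omega⟩

-- the outer loop on range(lo, n): hit when lo ≤ i < j < n,
-- at exponent idx + (pairs with first component in [lo, i)) + (j - i - 1)
theorem pvOuterA_range (bits i j n : Int) :
    ∀ (K : Nat) (lo idx : Int), (n - lo).toNat = K →
    pvOuterA bits i j n (PySem.List.pyRange lo n 1) idx =
      if lo ≤ i ∧ i < j ∧ j < n then
        PySem.Int.bxor bits ((1 : Int) <<<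
          (idx + ((PySem.List.pyRange lo i 1).map (fun t => n - 1 - t)).sum + (j - i - 1)).toNat)
      else bits := by
  intro K
  induction K with
  | zero =>
    intro lo idx hK
    rw [PySem.List.pyRange_one_eq_nil (by omega)]
    simp only [pvOuterA]
    have : ¬ (lo ≤ i ∧ i < j ∧ j < n) := by rintro ⟨h1, h2, h3⟩; omega
    rw [if_neg this]
  | succ K ih =>
    intro lo idx hK
    rw [PySem.List.pyRange_one_cons (by omega)]
    simp only [pvOuterA]
    rw [pvInnerA_range bits i j lo n (n - (lo + 1)).toNat (lo + 1) idx rfl]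
    by_cases hhit : lo = i ∧ lo + 1 ≤ j ∧ j < n
    · rw [if_pos hhit]
      have hcond : lo ≤ i ∧ i < j ∧ j < n := ⟨le_of_eq hhit.1, by omega, hhit.2.2⟩
      rw [if_pos hcond]
      have hr : PySem.List.pyRange lo i 1 = [] := PySem.List.pyRange_one_eq_nil (by omega)
      have : idx + ((PySem.List.pyRange lo i 1).map (fun t => n - 1 - t)).sum + (j - i - 1)
           = idx + (j - (lo + 1)) := by rw [hr]; simp; omega
      rw [this]
    · rw [if_neg hhit]
      dsimp only
      rw [ih (lo + 1) (idx + (n - (lo + 1)).toNat) (by omega)]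
      by_cases hc : lo + 1 ≤ i ∧ i < j ∧ j < n
      · rw [if_pos hc, if_pos ⟨by omega, hc.2⟩]
        have hsplit : PySem.List.pyRange lo i 1
            = PySem.List.pyRange lo (lo + 1) 1 ++ PySem.List.pyRange (lo + 1) i 1 :=
          PySem.List.pyRange_one_append lo (lo + 1) i (by omega) (by omega)
        have hone : PySem.List.pyRange lo (lo + 1) 1 = [lo] := PySem.List.pyRange_one_singleton lo
        rw [hsplit, hone]
        have : ((n - (lo + 1)).toNat : Int) = n - lo - 1 := by omega
        simp only [List.map_append, List.sum_append, List.map_cons, List.map_nil,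
          List.sum_cons, List.sum_nil, this]
        ring_nf
      · have hc' : ¬ (lo ≤ i ∧ i < j ∧ j < n) := by
          rintro ⟨h1, h2, h3⟩
          exact (if h4 : lo = i then hhit ⟨h4, by omega, h3⟩ else hc ⟨by omega, h2, h3⟩)
        rw [if_neg hc, if_neg hc']

-- the triangular sum from 0 to i, doubled (avoids division in the induction)
theorem pvSum_closed (n : Int) :
    ∀ (K : Nat) (i : Int), i.toNat = K → 0 ≤ i →
    2 * ((PySem.List.pyRange 0 i 1).map (fun t => n - 1 - t)).sum
      = 2 * (i * n) - i * (i + 1) := by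
  intro K
  induction K with
  | zero =>
    intro i hK hi
    have : i = 0 := by omega
    subst this
    rw [PySem.List.pyRange_one_eq_nil (by omega)]
    simp
  | succ K ih =>
    intro i hK hi
    have h1 : (0 : Int) ≤ i - 1 := by omega
    rw [show i = (i - 1) + 1 by ring, PySem.List.pyRange_one_succ_right (by omega)]
    simp only [List.map_append, List.sum_append, List.map_cons, List.map_nil,
      List.sum_cons, List.sum_nil]
    have := ih (i - 1) (by omega) h1
    ring_nf
    ring_nf at this
    omega

theorem flip_arc_eq_alt (bits i j n : Int) : flip_arc bits i j n = flip_arc_alt bits i j n := by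
  unfold flip_arc flip_arc_alt
  rw [pvOuterA_range bits i j n (n - 0).toNat 0 0 rfl]
  by_cases hc : 0 ≤ i ∧ i < j ∧ j < n
  · rw [if_pos hc, if_pos hc]
    have hsum := pvSum_closed n i.toNat i rfl hc.1
    have hdiv : PySem.Int.floordiv (i * (i + 1)) 2 * 2 = i * (i + 1) := by
      have h2 : (0:Int) < 2 := by omega
      have := PySem.Int.floordiv_mul_add_mod (i * (i + 1)) 2
      have hmod : PySem.Int.mod (i * (i + 1)) 2 = 0 := by
        rw [PySem.Int.mod_eq_emod_of_pos (by omega)]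
        omega
      omega
    congr 2
    omega
  · rw [if_neg hc, if_neg hc]

-- ===== VERDICT (by name: the statement is the Claim_ definition above) =====
theorem flip_arc_spec : Claim_equal_flip_arc := by
  intro bits i j n _
  exact flip_arc_eq_alt bits i j n
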